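-- pv_equiv track=rewrite | github.com/FranzSkuffka/Prog1_WS17 | WS17_HA08/crossword_helper.py | makematchingwordsdict
-- ===== SOURCE A (Python) =====
-- def extract_masking_information(masked_word, masked_char):
--   """Takes given word and returns a list of masked indices."""
--   maskedcharsatindex = []
--   for i in range(len(masked_word)):
--     if masked_word[i] == masked_char:
--       maskedcharsatindex.append(i)
--   return maskedcharsatindex
--
-- def maskword(word, masked_char, maskedcharatindex):
--   """Takes a word and a list of indices, returns a masked word."""
--   output = []
--   for i in range(len(word)):
--     if i in maskedcharatindex:
--       output.append(masked_char)
--     else: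
--       output.append(word[i])
--   return "".join(output)
--
-- def makematchingwordsdict(word_freq, masked_word, masked_char):
--   """Collects all words that match a masked word in a dictionary(clearword:freq)."""
--   out = {}
--   maskedcharsatindex = extract_masking_information(masked_word, masked_char)
--   temporaryword = ""
--   for i in word_freq.keys():
--     temporaryword = maskword(i, masked_char, maskedcharsatindex)
--     if masked_word == temporaryword:
--       out[i]=word_freq[i]
--   return out
-- ===== SOURCE B (Python) =====
-- def makematchingwordsdict(word_freq, masked_word, masked_char):
--   """Collects all words that match a masked word in a dictionary(clearword:freq).
--
--   One zip pass per word: a masked position (where masked_word carries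
--   masked_char) is a one-character wildcard, every other position must match
--   exactly; no masked-index list and no rebuilt string per word."""
--   def matches(word):
--     return len(word) == len(masked_word) and all(
--         m == masked_char or c == m for c, m in zip(word, masked_word))
--   return {w: f for w, f in word_freq.items() if matches(w)}
-- ===== Notes on version B (the rewrite author's own statement) =====
-- stated objective: faster
-- what changed: Instead of precomputing the list of masked indices and rebuilding a masked copy of every candidate word (per-character list append + join, with a linear scan of the index list at every position) to compare with masked_word, B compares each word to masked_word in a single short-circuiting zip pass, treating positions where masked_word carries masked_char as one-character wildcards; the length check also skips wrong-length words outright.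
import Mathlib
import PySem

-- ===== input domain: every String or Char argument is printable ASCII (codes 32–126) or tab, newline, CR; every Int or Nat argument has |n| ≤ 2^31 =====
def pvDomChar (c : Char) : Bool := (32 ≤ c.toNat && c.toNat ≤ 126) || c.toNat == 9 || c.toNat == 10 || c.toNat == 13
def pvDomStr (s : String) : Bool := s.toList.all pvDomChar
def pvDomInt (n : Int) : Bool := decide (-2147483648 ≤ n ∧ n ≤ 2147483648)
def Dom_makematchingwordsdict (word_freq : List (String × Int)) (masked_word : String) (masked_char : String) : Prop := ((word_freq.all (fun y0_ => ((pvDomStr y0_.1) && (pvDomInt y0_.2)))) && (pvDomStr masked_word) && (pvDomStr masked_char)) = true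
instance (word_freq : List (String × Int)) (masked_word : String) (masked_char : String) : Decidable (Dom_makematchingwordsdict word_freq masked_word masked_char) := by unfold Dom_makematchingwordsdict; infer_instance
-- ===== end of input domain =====

-- B replaces A's masked-index list + per-word masked-string rebuilding by a single
-- zip pass per word (masked positions are one-character wildcards); return value only.

-- ===== PORT A =====
-- Python's `masked_word[i] == masked_char` compares the 1-char string at i with
-- masked_char; ported exactly as comparing the char list [c] with masked_char.toList.
def extractMaskingInformation (masked_word : String) (masked_char : String) : List Int :=
  (PySem.List.pyRange 0 (PySem.Str.len masked_word)).foldl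
    (fun acc i =>
      if (PySem.Str.pyGet? masked_word i).map (fun c => [c]) = some masked_char.toList
      then acc ++ [i] else acc) []

-- returns the char list of Python's `"".join(output)` (i from range(len(word)), so
-- pyGet? is always `some`; `.elim []` is unreachable)
def maskwordChars (word : String) (masked_char : String) (maskedcharatindex : List Int) : List Char :=
  (PySem.List.pyRange 0 (PySem.Str.len word)).foldl
    (fun acc i =>
      if i ∈ maskedcharatindex then acc ++ masked_char.toList
      else acc ++ ((PySem.Str.pyGet? word i).elim [] (fun c => [c]))) []

def makematchingwordsdict (word_freq : List (String × Int)) (masked_word : String) (masked_char : String) : List (String × Int) :=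
  let d := PySem.Dict.mk word_freq
  let maskedcharsatindex := extractMaskingInformation masked_word masked_char
  -- `word_freq[i]`: i is a key of d, so getD never takes its default
  (d.keys.foldl
    (fun (out : PySem.Dict String Int) i =>
      if masked_word.toList = maskwordChars i masked_char maskedcharsatindex
      then out.insert i (d.getD i 0) else out)
    PySem.Dict.empty).items

-- ===== PORT B =====
def pvMatches (word : String) (masked_word : String) (masked_char : String) : Bool :=
  word.toList.length == masked_word.toList.length &&
  (word.toList.zip masked_word.toList).all
    (fun cm => masked_char.toList == [cm.2] || cm.1 == cm.2)

def makematchingwordsdict_alt (word_freq : List (String × Int)) (masked_word : String) (masked_char : String) : List (String × Int) :=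
  word_freq.filter (fun p => pvMatches p.1 masked_word masked_char)

-- ===== PRECONDITION & SPEC =====
-- word_freq stands for a Python dict, whose keys are always distinct; Pre_ only rules
-- out duplicate-key association lists, which no Python input produces.
def Pre_makematchingwordsdict (word_freq : List (String × Int)) (masked_word : String) (masked_char : String) : Prop :=
  (word_freq.map Prod.fst).Nodup
instance (word_freq : List (String × Int)) (masked_word : String) (masked_char : String) : Decidable (Pre_makematchingwordsdict word_freq masked_word masked_char) := by unfold Pre_makematchingwordsdict; infer_instance

def pvWitness_makematchingwordsdict : (List (String × Int)) × String × String :=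
  ([("cat", 1), ("dog", 2), ("car", 3)], "ca_", "_")

def Spec_makematchingwordsdict (word_freq : List (String × Int)) (masked_word : String) (masked_char : String) (out : List (String × Int)) : Prop := out = makematchingwordsdict_alt word_freq masked_word masked_char
instance (word_freq : List (String × Int)) (masked_word : String) (masked_char : String) (out : List (String × Int)) : Decidable (Spec_makematchingwordsdict word_freq masked_word masked_char out) := by unfold Spec_makematchingwordsdict; infer_instance

-- ===== CLAIM (what is proved, stated in full; the proofs are below) =====
def Claim_equal_makematchingwordsdict : Prop := ∀ (word_freq : List (String × Int)) (masked_word : String) (masked_char : String), Dom_makematchingwordsdict word_freq masked_word masked_char → Pre_makematchingwordsdict word_freq masked_word masked_char → Spec_makematchingwordsdict word_freq masked_word masked_char (makematchingwordsdict word_freq masked_word masked_char)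

-- ===== LEMMAS AND PROOFS =====

-- the masked-index list, in closed form
-- l.flatMap (fun x => [g x]) = l.map g (no PySem/Mathlib lemma in this exact shape)
theorem pv_flatMap_singleton_eq_map {α β : Type} (l : List α) (g : α → β) :
    l.flatMap (fun x => [g x]) = l.map g := by
  induction l with
  | nil => rfl
  | cons a t ih => simp [ih]

theorem extract_eq (mw mc : String) :
    extractMaskingInformation mw mc
      = ((List.range mw.toList.length).filter
          (fun k => decide (mw.toList[k]?.map (fun c => [c]) = some mc.toList))).map
          (fun (k : Nat) => (k : Int)) := by
  unfold extractMaskingInformation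
  rw [PySem.Str.len_eq, PySem.List.pyRange_zero_natCast,
      PySem.List.foldl_append_ite_eq_filter, List.nil_append, List.filter_map]
  simp only [Function.comp_def, PySem.Str.pyGet?_natCast]

theorem mem_extract (mw mc : String) (k : Nat) :
    ((k : Int) ∈ extractMaskingInformation mw mc)
      ↔ ∃ h : k < mw.toList.length, [mw.toList[k]] = mc.toList := by
  rw [extract_eq]
  simp only [List.mem_map, List.mem_filter, List.mem_range, decide_eq_true_eq]
  constructor
  · rintro ⟨j, ⟨hj, hopt⟩, hcast⟩
    have hjk : j = k := by exact_mod_cast hcast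
    subst hjk
    rw [List.getElem?_eq_getElem hj] at hopt
    exact ⟨hj, by simpa using hopt⟩
  · rintro ⟨h, heq⟩
    exact ⟨k, ⟨h, by rw [List.getElem?_eq_getElem h]; simpa using heq⟩, rfl⟩

-- the per-word match, as a Prop over indices: B's side
theorem pvMatches_iff (w mw mc : String) :
    pvMatches w mw mc = true
      ↔ w.toList.length = mw.toList.length ∧
        ∀ (k : Nat) (hw : k < w.toList.length) (hm : k < mw.toList.length),
          mc.toList = [mw.toList[k]] ∨ w.toList[k] = mw.toList[k] := by
  unfold pvMatches
  rw [Bool.and_eq_true, beq_iff_eq, List.all_eq_true]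
  constructor
  · rintro ⟨hlen, hall⟩
    refine ⟨hlen, fun k hw hm => ?_⟩
    have hmem : (w.toList[k], mw.toList[k]) ∈ w.toList.zip mw.toList := by
      rw [List.mem_iff_getElem]
      exact ⟨k, by simpa [List.length_zip] using And.intro hw hm, by simp⟩
    have := hall _ hmem
    simpa [Bool.or_eq_true] using this
  · rintro ⟨hlen, hidx⟩
    refine ⟨hlen, fun cm hmem => ?_⟩
    rw [List.mem_iff_getElem] at hmem
    obtain ⟨k, hk, hcm⟩ := hmem
    rw [List.length_zip] at hk
    have hw : k < w.toList.length := lt_of_lt_of_le hk (min_le_left _ _)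
    have hm : k < mw.toList.length := lt_of_lt_of_le hk (min_le_right _ _)
    have : cm = (w.toList[k], mw.toList[k]) := by rw [← hcm]; simp
    subst this
    simpa [Bool.or_eq_true] using hidx k hw hm

-- the masked word, in closed form
theorem maskword_eq (w mc : String) (S : List Int) :
    maskwordChars w mc S
      = (List.range w.toList.length).flatMap
          (fun (k : Nat) => if (k : Int) ∈ S then mc.toList else [w.toList[k]!]) := by
  unfold maskwordChars
  rw [PySem.Str.len_eq, PySem.List.pyRange_zero_natCast, List.foldl_map]
  have hfun : (fun (acc : List Char) (y : Nat) =>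
        if (y : Int) ∈ S then acc ++ mc.toList
        else acc ++ ((PySem.Str.pyGet? w (y : Int)).elim [] fun c => [c]))
      = fun acc (y : Nat) => acc ++
          (if (y : Int) ∈ S then mc.toList
           else (PySem.Str.pyGet? w (y : Int)).elim [] fun c => [c]) := by
    funext acc y; by_cases h : (y : Int) ∈ S <;> simp [h]
  rw [hfun, PySem.List.foldl_append_eq_flatMap, List.nil_append]
  apply List.flatMap_congr
  intro k hk
  rw [List.mem_range] at hk
  by_cases h : (k : Int) ∈ S
  · simp [h]
  · simp [h, PySem.Str.pyGet?_natCast, List.getElem?_eq_getElem hk,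
      List.getElem!_eq_getElem?_getD, List.getElem?_eq_getElem hk]

-- A's per-word test equals B's
theorem match_iff (w mw mc : String) :
    (mw.toList = maskwordChars w mc (extractMaskingInformation mw mc))
      ↔ pvMatches w mw mc = true := by
  rw [maskword_eq, pvMatches_iff]
  by_cases hC : ∃ c0, mc.toList = [c0]
  · obtain ⟨c0, hc0⟩ := hC
    -- every flatMap piece is a singleton: the mask is a map over range
    have hmap : (List.range w.toList.length).flatMap
          (fun (k : Nat) => if (k : Int) ∈ extractMaskingInformation mw mc
            then mc.toList else [w.toList[k]!])
        = (List.range w.toList.length).map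
          (fun (k : Nat) => if (k : Int) ∈ extractMaskingInformation mw mc
            then c0 else w.toList[k]!) := by
      have h1 : ∀ k ∈ List.range w.toList.length,
          (if (k : Int) ∈ extractMaskingInformation mw mc
            then mc.toList else [w.toList[k]!])
          = [if (k : Int) ∈ extractMaskingInformation mw mc
              then c0 else w.toList[k]!] := by
        intro k _
        by_cases h : (k : Int) ∈ extractMaskingInformation mw mc <;> simp [h, hc0]
      rw [List.flatMap_congr h1]
      exact pv_flatMap_singleton_eq_map _ _
    rw [hmap]
    constructor
    · intro hM
      have hlen : mw.toList.length = w.toList.length := by rw [hM]; simp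
      refine ⟨hlen.symm, fun k hw hm => ?_⟩
      by_cases h : (k : Int) ∈ extractMaskingInformation mw mc
      · obtain ⟨_, heq⟩ := (mem_extract mw mc k).mp h
        exact Or.inl heq.symm
      · refine Or.inr ?_
        have hh : mw.toList[k] = w.toList[k]! := by
          rw [List.getElem_of_eq hM hm]
          simp [h]
        rw [hh, List.getElem!_eq_getElem?_getD, List.getElem?_eq_getElem hw]
        rfl
    · rintro ⟨hlen, hidx⟩
      apply List.ext_getElem
      · simp [hlen]
      · intro k hm hk
        have hw : k < w.toList.length := by simpa using hk
        have hm' : k < mw.toList.length := hm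
        simp only [List.getElem_map, List.getElem_range]
        by_cases h : (k : Int) ∈ extractMaskingInformation mw mc
        · obtain ⟨_, heq⟩ := (mem_extract mw mc k).mp h
          rw [hc0] at heq
          simp only [List.cons.injEq, and_true] at heq
          simp [h]
          exact heq
        · have hwk : w.toList[k] = mw.toList[k] := by
            rcases hidx k hw hm' with hcm | hwm
            · exact absurd ((mem_extract mw mc k).mpr ⟨hm', hcm.symm⟩) h
            · exact hwm
          simp [h, List.getElem!_eq_getElem?_getD, List.getElem?_eq_getElem hw, hwk]
  · -- masked_char is not a single character: no position is masked
    have hS : ∀ k : Nat, (k : Int) ∉ extractMaskingInformation mw mc := by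
      intro k hk
      obtain ⟨_, heq⟩ := (mem_extract mw mc k).mp hk
      exact hC ⟨_, heq.symm⟩
    have hW : (List.range w.toList.length).flatMap
          (fun (k : Nat) => if (k : Int) ∈ extractMaskingInformation mw mc
            then mc.toList else [w.toList[k]!])
        = w.toList := by
      have : ∀ k ∈ List.range w.toList.length,
          (if (k : Int) ∈ extractMaskingInformation mw mc
            then mc.toList else [w.toList[k]!]) = [w.toList[k]!] := by
        intro k _; simp [hS k]
      rw [List.flatMap_congr this, pv_flatMap_singleton_eq_map]
      apply List.ext_getElem
      · simp
      · intro k h1 h2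
        have hw : k < w.toList.length := by simpa using h1
        simp [List.getElem!_eq_getElem?_getD, List.getElem?_eq_getElem hw]
    rw [hW]
    constructor
    · intro hM
      refine ⟨by rw [hM], fun k hw hm => Or.inr ?_⟩
      exact (List.getElem_of_eq hM hm).symm
    · rintro ⟨hlen, hidx⟩
      apply List.ext_getElem
      · omega
      · intro k hm hw
        rcases hidx k hw hm with hcm | hwm
        · exact absurd ⟨_, hcm⟩ hC
        · exact hwm.symm

-- A's whole result equals B's
theorem ports_agree (word_freq : List (String × Int)) (mw mc : String)
    (hnd : (word_freq.map Prod.fst).Nodup) :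
    makematchingwordsdict word_freq mw mc = makematchingwordsdict_alt word_freq mw mc := by
  unfold makematchingwordsdict makematchingwordsdict_alt
  dsimp only
  have hkeys : (PySem.Dict.mk word_freq).keys = word_freq.map Prod.fst := rfl
  rw [hkeys,
      PySem.List.foldl_ite_eq_foldl_filter
        (p := fun i => mw.toList = maskwordChars i mc (extractMaskingInformation mw mc))
        (f := fun (out : PySem.Dict String Int) i =>
          out.insert i ((PySem.Dict.mk word_freq).getD i 0)),
      PySem.Dict.items_foldl_insert_fresh _ (fun a => a)
        (fun i => (PySem.Dict.mk word_freq).getD i 0) PySem.Dict.empty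
        (fun a _ => PySem.Dict.contains_empty a)
        (by simpa using (hnd.filter _)),
      List.filter_map]
  have hie : (PySem.Dict.empty : PySem.Dict String Int).items = [] := rfl
  rw [hie]
  simp only [List.map_map, List.nil_append]
  have hval : ∀ p ∈ word_freq.filter
        ((fun i => decide (mw.toList = maskwordChars i mc (extractMaskingInformation mw mc)))
          ∘ Prod.fst),
      ((fun k => (k, (PySem.Dict.mk word_freq).getD k 0)) ∘ Prod.fst) p = p := by
    intro p hp
    have hpmem : p ∈ word_freq := List.mem_of_mem_filter hp
    have hitem : (p.1, p.2) ∈ (PySem.Dict.mk word_freq).items := by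
      simpa using hpmem
    have := PySem.Dict.getD_of_mem_items (PySem.Dict.mk word_freq) hitem hnd 0
    simp [Function.comp_def, this]
  rw [List.map_congr_left hval, List.map_id']
  apply List.filter_congr
  intro p _
  by_cases h : mw.toList = maskwordChars p.1 mc (extractMaskingInformation mw mc)
  · simp [Function.comp_def, h, (match_iff p.1 mw mc).mp h]
  · have hb : pvMatches p.1 mw mc = false := by
      cases hb : pvMatches p.1 mw mc
      · rfl
      · exact absurd ((match_iff p.1 mw mc).mpr hb) h
    simp [Function.comp_def, h, hb]

-- ===== VERDICT (by name: the statement is the Claim_ definition above) =====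
theorem makematchingwordsdict_spec : Claim_equal_makematchingwordsdict := by
  intro wf mw mc _ hpre
  exact ports_agree wf mw mc hpre
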